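-- pv_equiv track=rewrite | github.com/jackdewinter/pymarkdown | pymarkdown/parser_helper.py | collect_until_one_of_characters
-- ===== SOURCE A (Python) =====
-- from typing import Any, List, Optional, Tuple
--
-- def collect_until_one_of_characters(
--     source_string: str, start_index: int, match_characters: str
-- ) -> Tuple[Optional[int], Optional[str]]:
--     """
--     Collect a sequence of characters from a given starting point in a string until
--     we hit one of a given set of characters.
--
--     Returns the index of the first non-matching character and any extracted text
--     in a tuple.
--     """
--
--     source_string_size = len(source_string)
--     if not 0 <= start_index <= source_string_size:
--         return None, None
--
--     index = start_index
--     while (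
--         index < source_string_size and source_string[index] not in match_characters
--     ):
--         index += 1
--
--     return index, source_string[start_index:index]
-- ===== SOURCE B (Python) =====
-- def collect_until_one_of_characters(source_string, start_index, match_characters):
--     source_string_size = len(source_string)
--     if not 0 <= start_index <= source_string_size:
--         return None, None
--
--     candidates = [p for p in (source_string.find(c, start_index) for c in match_characters) if p >= 0]
--     index = min(candidates) if candidates else source_string_size
--     return index, source_string[start_index:index]
-- ===== Notes on version B (the rewrite author's own statement) =====
-- stated objective: alternative
-- what changed: Replaces A's single character-by-character scan (with a substring membership test per position) by one str.find per delimiter character followed by taking the minimum of the hit positions (defaulting to the string length when no delimiter occurs).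
import Mathlib
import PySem

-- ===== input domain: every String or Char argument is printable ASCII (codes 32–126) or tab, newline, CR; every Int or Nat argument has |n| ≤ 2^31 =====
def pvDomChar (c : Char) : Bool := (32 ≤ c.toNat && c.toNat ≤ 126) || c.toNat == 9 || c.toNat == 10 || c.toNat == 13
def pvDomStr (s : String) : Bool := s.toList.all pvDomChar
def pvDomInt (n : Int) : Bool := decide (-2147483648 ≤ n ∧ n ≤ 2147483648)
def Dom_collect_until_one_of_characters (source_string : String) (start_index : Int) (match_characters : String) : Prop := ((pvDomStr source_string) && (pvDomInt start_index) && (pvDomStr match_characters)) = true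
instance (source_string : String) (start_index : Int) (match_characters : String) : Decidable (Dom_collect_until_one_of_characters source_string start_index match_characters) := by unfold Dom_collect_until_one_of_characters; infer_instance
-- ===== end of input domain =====

-- B replaces A's one-character-at-a-time scan by one str.find per delimiter character plus a minimum
-- (objective: alternative decomposition, same exact result; not claimed faster).

-- ===== PORT A =====
-- the while loop of A: advance index while in range and the current character is not in match_characters
def pvALoop (src mc : List Char) (i : Nat) : Nat :=
  if h : i < src.length then
    if PySem.Chars.isIn [src[i]] mc then i
    else pvALoop src mc (i + 1)
  else i
termination_by src.length - i

def collect_until_one_of_characters (source_string : String) (start_index : Int) (match_characters : String) : Option Int × Option String :=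
  let source_string_size : Int := PySem.Str.len source_string
  if 0 ≤ start_index ∧ start_index ≤ source_string_size then
    let index : Int := (pvALoop source_string.toList match_characters.toList start_index.toNat : Int)
    (some index, some (String.ofList (PySem.List.slice source_string.toList (some start_index) (some index))))
  else (none, none)

-- ===== PORT B =====
def collect_until_one_of_characters_alt (source_string : String) (start_index : Int) (match_characters : String) : Option Int × Option String :=
  let source_string_size : Int := PySem.Str.len source_string
  if 0 ≤ start_index ∧ start_index ≤ source_string_size then
    let candidates : List Int :=
      (match_characters.toList.map (fun c => PySem.Str.findFrom source_string (String.ofList [c]) start_index)).filter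
        (fun p => decide (0 ≤ p))
    let index : Int :=
      match PySem.List.min? candidates (fun x => x) with
      | some m => m
      | none => source_string_size
    (some index, some (String.ofList (PySem.List.slice source_string.toList (some start_index) (some index))))
  else (none, none)

-- ===== PRECONDITION & SPEC =====
def Spec_collect_until_one_of_characters (source_string : String) (start_index : Int) (match_characters : String) (out : Option Int × Option String) : Prop := out = collect_until_one_of_characters_alt source_string start_index match_characters
instance (source_string : String) (start_index : Int) (match_characters : String) (out : Option Int × Option String) : Decidable (Spec_collect_until_one_of_characters source_string start_index match_characters out) := by unfold Spec_collect_until_one_of_characters; infer_instance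

-- ===== CLAIM (what is proved, stated in full; the proofs are below) =====
def Claim_equal_collect_until_one_of_characters : Prop := ∀ (source_string : String) (start_index : Int) (match_characters : String), Dom_collect_until_one_of_characters source_string start_index match_characters → Spec_collect_until_one_of_characters source_string start_index match_characters (collect_until_one_of_characters source_string start_index match_characters)

-- ===== LEMMAS AND PROOFS =====

-- A's scan computes the first index ≥ k holding a character of mc (or the end of the string)
lemma pvALoop_eq (src mc : List Char) (k : Nat) :
    pvALoop src mc k = k + (src.drop k).findIdx (fun c => PySem.Chars.isIn [c] mc) := by
  induction hn : src.length - k generalizing k with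
  | zero =>
      rw [pvALoop, dif_neg (by omega), List.drop_eq_nil_iff.mpr (by omega)]
      simp
  | succ n ih =>
      have hk : k < src.length := by omega
      rw [pvALoop, dif_pos hk, List.drop_eq_getElem_cons hk, List.findIdx_cons]
      by_cases hin : PySem.Chars.isIn [src[k]] mc
      · rw [if_pos hin, hin]
        simp
      · have hin' : PySem.Chars.isIn [src[k]] mc = false := by simpa using hin
        rw [if_neg hin, ih (k + 1) (by omega), hin']
        simp
        omega

-- single-character membership: [c] is "in" s iff c is an element
lemma pvIsIn_singleton (c : Char) (s : List Char) :
    PySem.Chars.isIn [c] s = true ↔ c ∈ s := by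
  rw [PySem.Chars.isIn_iff_infix, List.singleton_infix_iff]

-- a singleton prefix of a drop pins down the character at that position
lemma pvPrefix_drop_iff (c : Char) (s : List Char) (i : Nat) :
    [c] <+: s.drop i ↔ ∃ h : i < s.length, s[i] = c := by
  constructor
  · intro hp
    rcases List.cons_prefix_iff.mp hp with ⟨l', hl', -⟩
    have hi : i < s.length := by
      by_contra hge
      rw [List.drop_eq_nil_iff.mpr (by omega)] at hl'
      simp at hl'
    refine ⟨hi, ?_⟩
    rw [List.drop_eq_getElem_cons hi] at hl'
    have h1 := congrArg List.head? hl'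
    simp only [List.head?_cons] at h1
    exact Option.some.inj h1
  · rintro ⟨hi, hc⟩
    rw [List.drop_eq_getElem_cons hi, hc]
    exact ⟨_, rfl⟩

-- core: the minimum of the per-character finds (taken on the suffix starting at k) is the
-- first index ≥ k whose character lies in mc, or the end of the string
lemma pvMin_cands (s mc : List Char) (k : Nat) :
    (match PySem.List.min?
        ((mc.map (fun c => if PySem.Chars.find s [c] = -1 then -1 else (k : Int) + PySem.Chars.find s [c])).filter
          (fun p => decide (0 ≤ p))) (fun x => x) with
      | some m => m
      | none => (k : Int) + (s.length : Int)) =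
    (k : Int) + ((s.findIdx (fun c => PySem.Chars.isIn [c] mc) : Nat) : Int) := by
  set t := s.findIdx (fun c => PySem.Chars.isIn [c] mc) with ht
  set cands := ((mc.map (fun c => if PySem.Chars.find s [c] = -1 then -1 else (k : Int) + PySem.Chars.find s [c])).filter
          (fun p => decide (0 ≤ p))) with hcands
  cases hm : PySem.List.min? cands (fun x => x) with
  | none =>
      have hnil : cands = [] := (PySem.List.min?_eq_none_iff _ _).mp hm
      have hall : ∀ c ∈ mc, PySem.Chars.find s [c] = -1 := by
        intro c hc
        by_contra hne
        have hge : 0 ≤ PySem.Chars.find s [c] := by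
          have := PySem.Chars.neg_one_le_find s [c]; omega
        have hmem : ((k : Int) + PySem.Chars.find s [c]) ∈ cands := by
          rw [hcands]
          refine List.mem_filter.mpr ⟨?_, by simpa using by omega⟩
          exact List.mem_map.mpr ⟨c, hc, by rw [if_neg hne]⟩
        rw [hnil] at hmem
        exact absurd hmem List.not_mem_nil
      have hT : t = s.length := by
        rw [ht]
        apply List.findIdx_eq_length.mpr
        intro x hx
        apply Bool.eq_false_iff.mpr
        intro hin
        have hxmc : x ∈ mc := (pvIsIn_singleton x mc).mp hin
        have hfe := hall x hxmc
        have hni : ¬ [x] <:+: s := by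
          rw [← PySem.Chars.find_eq_neg_one_iff]; exact hfe
        exact hni ((List.singleton_infix_iff x s).mpr hx)
      have hred : (match (none : Option Int) with
          | some m => m
          | none => (k : Int) + (s.length : Int)) = (k : Int) + (s.length : Int) := rfl
      rw [hred, hT]
  | some m =>
      have hred : (match (some m : Option Int) with
          | some m => m
          | none => (k : Int) + (s.length : Int)) = m := rfl
      rw [hred]
      have hmem := PySem.List.min?_mem hm
      have hpos : 0 ≤ m := by
        have := (List.mem_filter.mp (hcands ▸ hmem)).2
        simpa using this
      obtain ⟨c₀, hc₀, hv⟩ := List.mem_map.mp (List.mem_filter.mp (hcands ▸ hmem)).1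
      have hf₀ne : PySem.Chars.find s [c₀] ≠ -1 := by
        intro h; rw [h] at hv; simp at hv; omega
      have hf₀ : 0 ≤ PySem.Chars.find s [c₀] := by
        have := PySem.Chars.neg_one_le_find s [c₀]; omega
      have hvm : m = (k : Int) + PySem.Chars.find s [c₀] := by rw [← hv, if_neg hf₀ne]
      obtain ⟨hpre₀, hmin₀⟩ := PySem.Chars.find_spec hf₀
      obtain ⟨hlt₀, hc₀at⟩ := (pvPrefix_drop_iff c₀ s _).mp hpre₀
      -- t ≤ find s [c₀]
      have hT_le : t ≤ (PySem.Chars.find s [c₀]).toNat := by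
        by_contra hgt
        have hfalse := List.not_of_lt_findIdx (p := fun c => PySem.Chars.isIn [c] mc)
          (xs := s) (i := (PySem.Chars.find s [c₀]).toNat) (by omega)
        have hfalse' : PySem.Chars.isIn [c₀] mc = false := by
          rw [← hc₀at]; exact hfalse
        exact (Bool.eq_false_iff.mp hfalse') ((pvIsIn_singleton c₀ mc).mpr hc₀)
      have hTlt : t < s.length := Nat.lt_of_le_of_lt hT_le hlt₀
      -- the character at t is in mc, and its find is ≤ t
      have hc₁ : PySem.Chars.isIn [s[t]] mc = true :=
        List.findIdx_getElem (w := ht ▸ hTlt)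
      have hc₁mc : s[t] ∈ mc := (pvIsIn_singleton _ mc).mp hc₁
      have hpre₁ : [s[t]] <+: s.drop t := (pvPrefix_drop_iff _ s t).mpr ⟨hTlt, rfl⟩
      have hf₁ : 0 ≤ PySem.Chars.find s [s[t]] := by
        rw [PySem.Chars.find_nonneg_iff]
        exact (List.singleton_infix_iff _ s).mpr (s.getElem_mem hTlt)
      obtain ⟨-, hmin₁⟩ := PySem.Chars.find_spec hf₁
      have hf₁le : (PySem.Chars.find s [s[t]]).toNat ≤ t := by
        by_contra hgt
        exact hmin₁ t (by omega) hpre₁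
      have hmem₁ : ((k : Int) + PySem.Chars.find s [s[t]]) ∈ cands := by
        rw [hcands]
        refine List.mem_filter.mpr ⟨List.mem_map.mpr ⟨s[t], hc₁mc, ?_⟩, by simpa using by omega⟩
        rw [if_neg (by omega)]
      have hle₁ := PySem.List.min?_isMin hm _ hmem₁
      simp only at hle₁
      omega

-- (String.ofList cs).toList = cs, used to push the singleton search string to the char level
lemma pvToList_ofList (cs : List Char) : (String.ofList cs).toList = cs := by simp

-- ===== VERDICT (by name: the statement is the Claim_ definition above) =====
theorem collect_until_one_of_characters_spec : Claim_equal_collect_until_one_of_characters := by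
  intro source_string start_index match_characters _
  unfold Spec_collect_until_one_of_characters
  unfold collect_until_one_of_characters collect_until_one_of_characters_alt
  simp only []
  split_ifs with h
  · obtain ⟨h0, hle⟩ := h
    set sl := source_string.toList with hsl
    have hlen : PySem.Str.len source_string = (sl.length : Int) := by
      simp [PySem.Str.len_eq, hsl]
    set k := start_index.toNat with hk
    have hks : start_index = (k : Int) := (Int.toNat_of_nonneg h0).symm
    have hkle : k ≤ sl.length := by
      rw [hlen] at hle; omega
    -- rewrite B's finds through the suffix at k
    have hfindFrom : ∀ c : Char,
        PySem.Str.findFrom source_string (String.ofList [c]) start_index =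
          if PySem.Chars.find (sl.drop k) [c] = -1 then -1
          else (k : Int) + PySem.Chars.find (sl.drop k) [c] := by
      intro c
      rw [PySem.Str.findFrom_eq, hks]
      simpa [pvToList_ofList] using PySem.Chars.findFrom_natCast sl [c] k hkle
    have hcore := pvMin_cands (sl.drop k) match_characters.toList k
    have hdroplen : (k : Int) + ((sl.drop k).length : Int) = (sl.length : Int) := by
      rw [List.length_drop]; omega
    have hidx :
        (match PySem.List.min?
            ((match_characters.toList.map (fun c => PySem.Str.findFrom source_string (String.ofList [c]) start_index)).filter
              (fun p => decide (0 ≤ p))) (fun x => x) with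
          | some m => m
          | none => PySem.Str.len source_string) =
        ((pvALoop sl match_characters.toList k : Nat) : Int) := by
      rw [pvALoop_eq]
      have hmapeq :
          (match_characters.toList.map (fun c => PySem.Str.findFrom source_string (String.ofList [c]) start_index)) =
          (match_characters.toList.map (fun c =>
            if PySem.Chars.find (sl.drop k) [c] = -1 then -1
            else (k : Int) + PySem.Chars.find (sl.drop k) [c])) :=
        List.map_congr_left (fun c _ => hfindFrom c)
      rw [hmapeq, hlen, ← hdroplen, hcore]
      push_cast
      ring
    rw [hidx]
  · rfl
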